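-- pv_equiv track=rewrite | github.com/serizawan/aoc | 2020/p04/p4a.py | pull_next_passport
-- ===== SOURCE A (Python) =====
-- def pull_next_passport(l):
--     passport = []
--     while l:
--         # l.pop() pops the last item of a list
--         passport_line = l.pop(0)
--         if passport_line == '':
--             break
--         passport.append(passport_line)
--     return ' '.join(passport)
-- ===== SOURCE B (Python) =====
-- def pull_next_passport(l):
--     if '' in l:
--         i = l.index('')
--         passport = l[:i]
--         del l[:i+1]
--     else:
--         passport = l[:]
--         l.clear()
--     return ' '.join(passport)
-- ===== Notes on version B (the rewrite author's own statement) =====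
-- stated objective: faster
-- what changed: B locates the first blank line with index() and takes/deletes bulk slices, instead of A's pop(0) loop with a break; both consume the same prefix (plus the blank) from l and join it with spaces.
import Mathlib
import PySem

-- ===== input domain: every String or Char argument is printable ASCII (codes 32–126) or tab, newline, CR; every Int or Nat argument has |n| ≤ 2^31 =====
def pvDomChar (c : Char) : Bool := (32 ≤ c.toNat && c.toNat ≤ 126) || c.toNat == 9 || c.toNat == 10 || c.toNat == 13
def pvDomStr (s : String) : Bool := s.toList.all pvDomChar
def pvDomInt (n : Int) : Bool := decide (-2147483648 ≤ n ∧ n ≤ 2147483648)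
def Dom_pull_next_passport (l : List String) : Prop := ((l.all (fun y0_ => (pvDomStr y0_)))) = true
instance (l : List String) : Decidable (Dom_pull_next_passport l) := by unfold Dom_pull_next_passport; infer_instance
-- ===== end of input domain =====

-- B finds the first blank line and takes a bulk slice instead of A's pop(0)/break loop; return-value
-- equivalence only is proved (both Pythons mutate l identically: consumed prefix plus blank removed).


-- ===== PORT A =====
-- the while-loop: pop the head, break on '', append to passport
def pullA_loop (passport : List String) : List String → List String
  | [] => passport
  | line :: rest => if line = "" then passport else pullA_loop (passport ++ [line]) rest

def pull_next_passport (l : List String) : String :=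
  PySem.Str.join " " (pullA_loop [] l)

-- ===== PORT B =====
def pull_next_passport_alt (l : List String) : String :=
  match l.idxOf? "" with
  | some i => PySem.Str.join " " (l.take i)   -- '' in l, i = l.index(''), passport = l[:i]
  | none   => PySem.Str.join " " l            -- passport = l[:]

-- ===== PRECONDITION & SPEC =====
def Spec_pull_next_passport (l : List String) (out : String) : Prop := out = pull_next_passport_alt l
instance (l : List String) (out : String) : Decidable (Spec_pull_next_passport l out) := by unfold Spec_pull_next_passport; infer_instance

-- ===== CLAIM (what is proved, stated in full; the proofs are below) =====
def Claim_equal_pull_next_passport : Prop := ∀ (l : List String), Dom_pull_next_passport l → Spec_pull_next_passport l (pull_next_passport l)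

-- ===== LEMMAS AND PROOFS =====
theorem pullA_loop_eq (l acc : List String) :
    pullA_loop acc l = acc ++ l.takeWhile (fun x => x ≠ "") := by
  induction l generalizing acc with
  | nil => simp [pullA_loop]
  | cons x rest ih =>
    by_cases h : x = "" <;> simp [pullA_loop, h, ih]

theorem alt_take_eq (l : List String) :
    (match l.idxOf? "" with
      | some i => l.take i
      | none   => l) = l.takeWhile (fun x => x ≠ "") := by
  induction l with
  | nil => simp [List.idxOf?]
  | cons x rest ih =>
    by_cases h : x = ""
    · simp [List.idxOf?, List.findIdx?_cons, h]
    · simp only [List.idxOf?, List.findIdx?_cons, beq_iff_eq, h, if_false,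
        List.takeWhile_cons, ne_eq, not_false_eq_true, decide_true]
      simp only [List.idxOf?] at ih
      cases hfi : List.findIdx? (· == "") rest with
      | none => simp [hfi] at ih ⊢; exact ih
      | some i => simp [hfi] at ih ⊢; exact ih

-- ===== VERDICT (by name: the statement is the Claim_ definition above) =====
theorem pull_next_passport_spec : Claim_equal_pull_next_passport := by
  intro l _
  unfold Spec_pull_next_passport pull_next_passport pull_next_passport_alt
  rw [pullA_loop_eq, List.nil_append, ← alt_take_eq]
  cases List.idxOf? "" l <;> rfl
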